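-- pv_equiv track=rewrite | github.com/pdk5mjmvfd-cpu/primeFluX.ai | core/math/digit_propagation.py | propagate_12
-- ===== SOURCE A (Python) =====
-- from typing import List, Tuple, Optional
--
-- def propagate_12(p: int, iterations: int = 100) -> List[int]:
--     """
--     Propagate 12 (superposition) under mod-p dynamics.
--
--     12 for superposition: String 12 → |1⟩ + |2⟩, introduces midline (1/2)
--
--     Based on: ApopTosis Thesis §2.4 "Dual Flux Representation"
--
--     Args:
--         p: Prime modulus
--         iterations: Number of iterations
--
--     Returns:
--         List of states in propagation sequence
--     """
--     # Start with 12 (superposition)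
--     state = [1, 2]
--     sequence = []
--
--     # Iterate under mod-p dynamics
--     for _ in range(iterations):
--         # Apply mod-p transformation with superposition
--         # Superposition: |1⟩ + |2⟩ → (1 + 2) mod p = 3 mod p
--         if len(state) == 2:
--             # Combine 12 → 12 (decimal)
--             value = state[0] * 10 + state[1]
--             value = value % p
--             sequence.append(value)
--             # Update state with superposition
--             # Midline (1/2) introduces fractional component
--             state = [value // 10, value % 10]
--         else:
--             break
--
--     return sequence
-- ===== SOURCE B (Python) =====
-- def propagate_12(p: int, iterations: int = 100):
--     # The loop in A is degenerate: value is reconstructed from its own digits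
--     # each round, so every appended element equals 12 % p.
--     if iterations <= 0:
--         return []
--     return [12 % p] * iterations
-- ===== Notes on version B (the rewrite author's own statement) =====
-- stated objective: simpler
-- what changed: Replaced the stateful digit-splitting loop by a closed form: every iteration appends the same constant 12 % p, so B returns that constant repeated iterations times (no loop, no state).
import Mathlib
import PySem

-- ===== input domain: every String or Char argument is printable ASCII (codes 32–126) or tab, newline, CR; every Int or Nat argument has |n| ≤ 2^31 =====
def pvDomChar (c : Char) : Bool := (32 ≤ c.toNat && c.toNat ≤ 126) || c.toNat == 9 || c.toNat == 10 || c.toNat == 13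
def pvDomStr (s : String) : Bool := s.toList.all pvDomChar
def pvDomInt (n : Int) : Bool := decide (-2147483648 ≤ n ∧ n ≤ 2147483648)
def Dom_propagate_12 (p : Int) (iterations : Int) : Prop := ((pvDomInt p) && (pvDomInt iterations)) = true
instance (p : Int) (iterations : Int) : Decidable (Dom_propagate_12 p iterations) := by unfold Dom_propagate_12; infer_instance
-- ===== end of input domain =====

-- B replaces the stateful loop (whose value is constant every round) by the closed form
-- [12 % p] * iterations; objective: simpler. Return-value equivalence only (no mutation in A).

-- ===== PORT A =====
-- the for-loop with its break, state list and accumulated sequence, fuel = len(range(iterations))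
def pvLoopA (p : Int) (fuel : Nat) (state : List Int) (seq : List Int) : List Int :=
  match fuel with
  | 0 => seq
  | n + 1 =>
    if state.length = 2 then
      -- state[0], state[1]: in range since length = 2 in this branch, so getD 0 is exact
      let value0 := (PySem.List.pyGet? state 0).getD 0 * 10 + (PySem.List.pyGet? state 1).getD 0
      let value := PySem.Int.mod value0 p
      pvLoopA p n [PySem.Int.floordiv value 10, PySem.Int.mod value 10] (seq ++ [value])
    else seq

def propagate_12 (p : Int) (iterations : Int) : List Int :=
  pvLoopA p iterations.toNat [1, 2] []

-- ===== PORT B =====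
def propagate_12_alt (p : Int) (iterations : Int) : List Int :=
  if iterations ≤ 0 then []
  else List.replicate iterations.toNat (PySem.Int.mod 12 p)

-- ===== PRECONDITION & SPEC =====
-- Pre_ excludes exactly the inputs where A raises ZeroDivisionError (p = 0 with iterations ≥ 1)
def Pre_propagate_12 (p : Int) (iterations : Int) : Prop := p ≠ 0 ∨ iterations ≤ 0
instance (p : Int) (iterations : Int) : Decidable (Pre_propagate_12 p iterations) := by
  unfold Pre_propagate_12; infer_instance

def pvWitness_propagate_12 : Int × Int := (7, 4)

def Spec_propagate_12 (p : Int) (iterations : Int) (out : List Int) : Prop := out = propagate_12_alt p iterations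
instance (p : Int) (iterations : Int) (out : List Int) : Decidable (Spec_propagate_12 p iterations out) := by unfold Spec_propagate_12; infer_instance

-- ===== CLAIM (what is proved, stated in full; the proofs are below) =====
def Claim_equal_propagate_12 : Prop := ∀ (p : Int) (iterations : Int), Dom_propagate_12 p iterations → Pre_propagate_12 p iterations → Spec_propagate_12 p iterations (propagate_12 p iterations)

-- ===== LEMMAS AND PROOFS =====

-- 12 % p reduced mod p again is itself (Python mod has the divisor's sign)
theorem pv_mod_mod (p a : Int) (hp : p ≠ 0) :
    PySem.Int.mod (PySem.Int.mod a p) p = PySem.Int.mod a p := by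
  rcases lt_or_gt_of_ne hp with h | h
  · obtain ⟨h1, h2⟩ := PySem.Int.mod_neg_bounds a h
    obtain ⟨h1', h2'⟩ := PySem.Int.mod_neg_bounds (PySem.Int.mod a p) h
    have e1 := PySem.Int.floordiv_mul_add_mod (PySem.Int.mod a p) p
    have : PySem.Int.floordiv (PySem.Int.mod a p) p = 0 := by nlinarith
    nlinarith
  · have h1 := PySem.Int.mod_nonneg a h
    have h2 := PySem.Int.mod_lt a h
    have h1' := PySem.Int.mod_nonneg (PySem.Int.mod a p) h
    have h2' := PySem.Int.mod_lt (PySem.Int.mod a p) h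
    have e1 := PySem.Int.floordiv_mul_add_mod (PySem.Int.mod a p) p
    have : PySem.Int.floordiv (PySem.Int.mod a p) p = 0 := by nlinarith
    nlinarith

-- one unfolding of the loop on a two-element state
theorem pvLoopA_step (p : Int) (n : Nat) (a b : Int) (seq : List Int) :
    pvLoopA p (n + 1) [a, b] seq
      = pvLoopA p n [PySem.Int.floordiv (PySem.Int.mod (a * 10 + b) p) 10,
                     PySem.Int.mod (PySem.Int.mod (a * 10 + b) p) 10]
          (seq ++ [PySem.Int.mod (a * 10 + b) p]) := by
  rw [pvLoopA]
  simp [PySem.List.pyGet?, PySem.List.pyIdx?]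

-- the loop with the fixed-point state appends the constant v every round
theorem pvLoopA_const (p : Int) (hp : p ≠ 0) (n : Nat) (seq : List Int) :
    pvLoopA p n [PySem.Int.floordiv (PySem.Int.mod 12 p) 10,
                 PySem.Int.mod (PySem.Int.mod 12 p) 10] seq
      = seq ++ List.replicate n (PySem.Int.mod 12 p) := by
  induction n generalizing seq with
  | zero => simp [pvLoopA]
  | succ n ih =>
    rw [pvLoopA_step, PySem.Int.floordiv_mul_add_mod (PySem.Int.mod 12 p) 10,
        pv_mod_mod _ _ hp, ih]
    simp [List.replicate_succ]

-- ===== VERDICT (by name: the statement is the Claim_ definition above) =====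
theorem propagate_12_spec : Claim_equal_propagate_12 := by
  intro p iterations _ hpre
  unfold Spec_propagate_12 propagate_12 propagate_12_alt
  unfold Pre_propagate_12 at hpre
  by_cases hle : iterations ≤ 0
  · have : iterations.toNat = 0 := by omega
    simp [this, pvLoopA, hle]
  · have hp : p ≠ 0 := by rcases hpre with h | h; exacts [h, absurd h hle]
    rw [if_neg hle]
    obtain ⟨n, hn⟩ : ∃ n : Nat, iterations.toNat = n + 1 := ⟨iterations.toNat - 1, by omega⟩
    rw [hn, pvLoopA_step]
    have h12 : (1 : Int) * 10 + 2 = 12 := by norm_num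
    rw [h12, pvLoopA_const p hp n]
    simp [List.replicate_succ]
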